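-- pv_equiv track=rewrite | github.com/castrojefferson/Trabalhos-Da-Faculdade | Matematica Financeira/regraDeSturgesComResolucaoExercicio5/main.py | calcularIntervalos
-- ===== SOURCE A (Python) =====
-- def calcularIntervalos(notasDoTeste, numeroDeClasses, tamanhoDaClasse):
-- 	contador=0
-- 	intervalos = []
--
-- 	while (numeroDeClasses):
-- 		if(contador == 0):
-- 			intervalos.append((notasDoTeste[contador], notasDoTeste[contador]+tamanhoDaClasse)) # 62 ok
-- 		else:
-- 			intervalos.append((intervalos[contador-1][1], intervalos[contador-1][1]+tamanhoDaClasse)) # 62 ok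
-- 		contador+=1
-- 		numeroDeClasses-=1
--
-- 	return intervalos
-- ===== SOURCE B (Python) =====
-- def calcularIntervalos(notasDoTeste, numeroDeClasses, tamanhoDaClasse):
--     if numeroDeClasses <= 0:
--         return []
--     s = notasDoTeste[0]
--     return [(s + i * tamanhoDaClasse, s + i * tamanhoDaClasse + tamanhoDaClasse)
--             for i in range(numeroDeClasses)]
-- ===== Notes on version B (the rewrite author's own statement) =====
-- stated objective: alternative
-- what changed: B computes each interval independently by the closed-form formula start + i*width over range(n), instead of A's sequential recurrence that reads the previous tuple's second element from the growing result list.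
import Mathlib
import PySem

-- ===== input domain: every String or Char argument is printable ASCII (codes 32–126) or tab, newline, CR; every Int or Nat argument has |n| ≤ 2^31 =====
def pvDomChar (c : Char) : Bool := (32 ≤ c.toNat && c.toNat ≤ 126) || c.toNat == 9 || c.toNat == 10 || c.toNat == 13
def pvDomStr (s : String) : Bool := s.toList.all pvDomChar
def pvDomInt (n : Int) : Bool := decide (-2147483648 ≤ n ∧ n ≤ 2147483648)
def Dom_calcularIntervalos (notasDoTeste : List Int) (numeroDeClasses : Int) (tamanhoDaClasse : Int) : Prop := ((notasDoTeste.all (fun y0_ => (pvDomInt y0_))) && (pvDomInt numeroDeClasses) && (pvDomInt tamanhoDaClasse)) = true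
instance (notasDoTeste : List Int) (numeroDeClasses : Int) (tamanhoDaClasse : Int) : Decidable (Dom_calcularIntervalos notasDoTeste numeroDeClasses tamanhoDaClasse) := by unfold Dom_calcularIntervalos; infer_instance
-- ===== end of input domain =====

-- B computes each interval independently by the closed form start + i*width over
-- range(n), instead of A's recurrence reading the previous tuple's second element
-- (objective: alternative algorithm, same cost).

-- ===== PORT A =====
-- the while-loop of A: state (contador, intervalos), fuel = remaining numeroDeClasses
def calcAuxA (notasDoTeste : List Int) (tamanhoDaClasse : Int)
    (contador : Nat) (fuel : Nat) (intervalos : List (Int × Int)) : List (Int × Int) :=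
  match fuel with
  | 0 => intervalos
  | f + 1 =>
    let pair :=
      if contador = 0 then
        -- notasDoTeste[contador]; Pre_ guarantees in range, getD is never taken
        let x := (PySem.List.pyGet? notasDoTeste (contador : Int)).getD 0
        (x, x + tamanhoDaClasse)
      else
        let prev := (PySem.List.pyGet? intervalos ((contador : Int) - 1)).getD (0, 0)
        (prev.2, prev.2 + tamanhoDaClasse)
    calcAuxA notasDoTeste tamanhoDaClasse (contador + 1) f (intervalos ++ [pair])

def calcularIntervalos (notasDoTeste : List Int) (numeroDeClasses : Int) (tamanhoDaClasse : Int) : List (Int × Int) :=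
  calcAuxA notasDoTeste tamanhoDaClasse 0 numeroDeClasses.toNat []

-- ===== PORT B =====
def calcularIntervalos_alt (notasDoTeste : List Int) (numeroDeClasses : Int) (tamanhoDaClasse : Int) : List (Int × Int) :=
  if numeroDeClasses ≤ 0 then []
  else
    let s := (PySem.List.pyGet? notasDoTeste 0).getD 0
    (PySem.List.pyRange 0 numeroDeClasses 1).map
      (fun i => (s + i * tamanhoDaClasse, s + i * tamanhoDaClasse + tamanhoDaClasse))

-- ===== PRECONDITION & SPEC =====
-- Pre_ excludes numeroDeClasses < 0 (A's while-loop never terminates there) and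
-- numeroDeClasses > 0 with an empty notasDoTeste (A raises IndexError on notasDoTeste[0]).
def Pre_calcularIntervalos (notasDoTeste : List Int) (numeroDeClasses : Int) (tamanhoDaClasse : Int) : Prop :=
  0 ≤ numeroDeClasses ∧ (numeroDeClasses = 0 ∨ notasDoTeste ≠ [])
instance (notasDoTeste : List Int) (numeroDeClasses : Int) (tamanhoDaClasse : Int) : Decidable (Pre_calcularIntervalos notasDoTeste numeroDeClasses tamanhoDaClasse) := by unfold Pre_calcularIntervalos; infer_instance

def pvWitness_calcularIntervalos : List Int × Int × Int := ([5, 9], 3, 2)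

def Spec_calcularIntervalos (notasDoTeste : List Int) (numeroDeClasses : Int) (tamanhoDaClasse : Int) (out : List (Int × Int)) : Prop := out = calcularIntervalos_alt notasDoTeste numeroDeClasses tamanhoDaClasse
instance (notasDoTeste : List Int) (numeroDeClasses : Int) (tamanhoDaClasse : Int) (out : List (Int × Int)) : Decidable (Spec_calcularIntervalos notasDoTeste numeroDeClasses tamanhoDaClasse out) := by unfold Spec_calcularIntervalos; infer_instance

-- ===== CLAIM =====
def Claim_equal_calcularIntervalos : Prop := ∀ (notasDoTeste : List Int) (numeroDeClasses : Int) (tamanhoDaClasse : Int), Dom_calcularIntervalos notasDoTeste numeroDeClasses tamanhoDaClasse → Pre_calcularIntervalos notasDoTeste numeroDeClasses tamanhoDaClasse → Spec_calcularIntervalos notasDoTeste numeroDeClasses tamanhoDaClasse (calcularIntervalos notasDoTeste numeroDeClasses tamanhoDaClasse)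

-- ===== LEMMAS AND PROOFS =====

-- reference: the n class intervals starting from boundary v with width t
def refList (v t : Int) : Nat → List (Int × Int)
  | 0 => []
  | n + 1 => (v, v + t) :: refList (v + t) t n

theorem calcAuxA_inv (notas : List Int) (t : Int) (fuel : Nat) :
    ∀ (ivs : List (Int × Int)) (a v : Int), ivs.getLast? = some (a, v) →
    calcAuxA notas t ivs.length fuel ivs = ivs ++ refList v t fuel := by
  induction fuel with
  | zero => intro ivs a v _; simp [calcAuxA, refList]
  | succ f ih =>
    intro ivs a v hlast
    have hne : ivs ≠ [] := by
      intro h; rw [h] at hlast; simp at hlast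
    have hlen : ivs.length ≠ 0 := by simpa using hne
    have hget : PySem.List.pyGet? ivs ((ivs.length : Int) - 1) = some (a, v) := by
      have h1 : ((ivs.length : Int) - 1) = ((ivs.length - 1 : Nat) : Int) := by omega
      rw [h1, PySem.List.pyGet?_natCast, ← List.getLast?_eq_getElem?]
      exact hlast
    unfold calcAuxA
    rw [if_neg hlen, hget]
    have harg : ivs.length + 1 = (ivs ++ [(v, v + t)]).length := by simp
    simp only [Option.getD_some]
    rw [harg, ih (ivs ++ [(v, v + t)]) v (v + t) (by rw [List.getLast?_concat])]
    simp [refList]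

-- the closed form equals the recurrence's reference list
theorem refList_eq_map (t : Int) (n : Nat) :
    ∀ v : Int, refList v t n
      = (List.range n).map (fun (k : Nat) => (v + (k : Int) * t, v + (k : Int) * t + t)) := by
  induction n with
  | zero => intro v; simp [refList]
  | succ m ih =>
    intro v
    rw [show refList v t (m + 1) = (v, v + t) :: refList (v + t) t m from rfl,
      List.range_succ_eq_map, List.map_cons, List.map_map, ih (v + t)]
    congr 1
    · norm_num
    · apply List.map_congr_left
      intro k _
      simp only [Function.comp_apply]
      simp only [Prod.mk.injEq]; constructor <;> (push_cast; ring)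

-- ===== VERDICT =====
theorem calcularIntervalos_spec : Claim_equal_calcularIntervalos := by
  intro notas n t _ hpre
  unfold Spec_calcularIntervalos calcularIntervalos calcularIntervalos_alt
  obtain ⟨hn, hcase⟩ := hpre
  rcases eq_or_lt_of_le hn with h0 | hpos
  · simp [← h0, calcAuxA]
  · have hne : notas ≠ [] := by
      rcases hcase with h | h
      · omega
      · exact h
    obtain ⟨x, rest, rfl⟩ := List.exists_cons_of_ne_nil hne
    rw [if_neg (by omega)]
    obtain ⟨m, hm⟩ : ∃ m : Nat, n.toNat = m + 1 := ⟨n.toNat - 1, by omega⟩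
    rw [hm]
    have hA : calcAuxA (x :: rest) t 0 (m + 1) [] =
        [(x, x + t)] ++ refList (x + t) t m := by
      unfold calcAuxA
      simp only [if_true, Nat.cast_zero, PySem.List.pyGet?_zero_cons,
        Option.getD_some, List.nil_append]
      exact calcAuxA_inv (x :: rest) t m [(x, x + t)] x (x + t) (by simp)
    rw [hA, show [(x, x + t)] ++ refList (x + t) t m = refList x t (m + 1) from rfl]
    have hn' : n = ((m + 1 : Nat) : Int) := by omega
    rw [hn', PySem.List.pyRange_one]
    simp only [PySem.List.pyGet?_zero_cons, Option.getD_some, List.map_map]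
    rw [refList_eq_map, show ((((m + 1 : Nat) : Int)) - 0).toNat = m + 1 by omega]
    apply List.map_congr_left
    intro k _
    simp only [Function.comp_apply]
    simp only [Prod.mk.injEq]; constructor <;> (push_cast; ring)
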